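-- pv_equiv track=rewrite | github.com/aohayon75/powerzio-security-audit | sensitive_files/database.powerzio.lan/dump_redis.py | show_passwd
-- ===== SOURCE A (Python) =====
-- def show_passwd(user_id):
--     i = 0
--     end = len(user_id)
--     string = []
--     while i < end:
--        string.append(chr(ord(user_id[i]) - 9)) # ord() function converts a character into an integer that represents the Unicode code of the character, the chr() function converts a Unicode code character into the corresponding string
--        i = i + 1
--     return "".join(string)
-- ===== SOURCE B (Python) =====
-- def show_passwd(user_id):
--     table = {c: c - 9 for c in set(map(ord, user_id))}
--     return user_id.translate(table)
-- ===== Notes on version B (the rewrite author's own statement) =====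
-- stated objective: idiomatic
-- what changed: Replaces the index-based while loop building a char list with a precomputed translation table over the distinct code points applied via str.translate.
import Mathlib
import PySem

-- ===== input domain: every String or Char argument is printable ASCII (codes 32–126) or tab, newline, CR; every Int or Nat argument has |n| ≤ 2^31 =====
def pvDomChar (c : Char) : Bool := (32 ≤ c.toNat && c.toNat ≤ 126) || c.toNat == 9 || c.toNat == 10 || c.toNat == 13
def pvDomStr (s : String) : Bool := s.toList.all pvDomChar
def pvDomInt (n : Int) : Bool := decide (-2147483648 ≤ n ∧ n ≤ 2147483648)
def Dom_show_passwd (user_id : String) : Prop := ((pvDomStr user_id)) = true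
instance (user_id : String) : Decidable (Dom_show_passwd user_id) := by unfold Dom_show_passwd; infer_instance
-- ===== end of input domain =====

-- B replaces A's index-based while loop with a translation table over the distinct
-- code points applied in one translate pass (objective: idiomatic).

-- ===== PORT A =====
-- while i < end: string.append(chr(ord(user_id[i]) - 9)); i += 1
-- chr(ord(c) - 9) ported as Char.ofNat ((c.toNat : Int) - 9).toNat — exact for codes ≥ 9 (all of Dom)
def pvALoop (user_id : String) (endn i : Nat) (string : List Char) : List Char :=
  if i < endn then
    match PySem.Str.pyGet? user_id (i : Int) with
    | some c => pvALoop user_id endn (i + 1) (string ++ [Char.ofNat ((c.toNat : Int) - 9).toNat])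
    | none => string   -- unreachable: 0 ≤ i < len(user_id)
  else string
termination_by endn - i

def show_passwd (user_id : String) : String :=
  String.ofList (pvALoop user_id user_id.toList.length 0 [])

-- ===== PORT B =====
-- table = {c: c - 9 for c in set(map(ord, user_id))}
def pvTable (user_id : String) : PySem.Dict Nat Int :=
  (PySem.Set.ofList (user_id.toList.map Char.toNat)).foldl
    (fun d c => d.insert c ((c : Int) - 9)) PySem.Dict.empty

-- user_id.translate(table): chars whose code is a key are replaced, others kept
def show_passwd_alt (user_id : String) : String :=
  String.ofList (user_id.toList.map (fun ch =>
    match (pvTable user_id).get? ch.toNat with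
    | some v => Char.ofNat v.toNat
    | none => ch))

-- ===== PRECONDITION & SPEC =====
def Spec_show_passwd (user_id : String) (out : String) : Prop := out = show_passwd_alt user_id
instance (user_id : String) (out : String) : Decidable (Spec_show_passwd user_id out) := by unfold Spec_show_passwd; infer_instance

-- ===== CLAIM (what is proved, stated in full; the proofs are below) =====
def Claim_equal_show_passwd : Prop := ∀ (user_id : String), Dom_show_passwd user_id → Spec_show_passwd user_id (show_passwd user_id)

-- ===== LEMMAS AND PROOFS =====

-- the common translation of a single character
def pvF (c : Char) : Char := Char.ofNat ((c.toNat : Int) - 9).toNat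

lemma pvTable_get? (l : List Nat) (d : PySem.Dict Nat Int) (k : Nat)
    (hk : k ∈ l ∨ d.get? k = some ((k : Int) - 9)) :
    (l.foldl (fun d c => d.insert c ((c : Int) - 9)) d).get? k = some ((k : Int) - 9) := by
  induction l generalizing d with
  | nil => simpa using hk.resolve_left (by simp)
  | cons c t ih =>
    simp only [List.foldl_cons]
    apply ih
    by_cases hkc : k = c
    · subst hkc
      right; exact PySem.Dict.get?_insert_self d k _
    · rcases hk with hk | hk
      · rcases List.mem_cons.mp hk with h | h
        · exact absurd h hkc
        · exact Or.inl h
      · right; rw [PySem.Dict.get?_insert_of_ne d _ hkc]; exact hk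

lemma pvAlt_eq_map (user_id : String) :
    show_passwd_alt user_id = String.ofList (user_id.toList.map pvF) := by
  unfold show_passwd_alt
  congr 1
  apply List.map_congr_left
  intro ch hch
  have : (pvTable user_id).get? ch.toNat = some ((ch.toNat : Int) - 9) := by
    unfold pvTable
    apply pvTable_get?
    left
    rw [PySem.Set.mem_ofList]
    exact List.mem_map_of_mem hch
  rw [this]
  simp [pvF]

lemma pvALoop_eq (user_id : String) :
    ∀ (k : Nat) (i : Nat) (acc : List Char), user_id.toList.length - i ≤ k →
    pvALoop user_id user_id.toList.length i acc
      = acc ++ (user_id.toList.drop i).map pvF := by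
  intro k
  induction k with
  | zero =>
    intro i acc h
    have hge : user_id.toList.length ≤ i := by omega
    unfold pvALoop
    rw [if_neg (Nat.not_lt.mpr hge)]
    rw [List.drop_eq_nil_of_le hge]
    simp
  | succ k ih =>
    intro i acc h
    by_cases hi : i < user_id.toList.length
    · have hget : PySem.Str.pyGet? user_id (i : Int) = some user_id.toList[i] := by
        simp [List.getElem?_eq_getElem hi]
      unfold pvALoop
      rw [if_pos hi, hget]
      dsimp only
      rw [ih (i + 1) _ (by omega)]
      rw [List.drop_eq_getElem_cons hi, List.map_cons]
      simp [pvF]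
    · unfold pvALoop
      rw [if_neg hi]
      rw [List.drop_eq_nil_of_le (Nat.not_lt.mp hi)]
      simp

-- ===== VERDICT (by name: the statement is the Claim_ definition above) =====
theorem show_passwd_spec : Claim_equal_show_passwd := by
  intro user_id _
  unfold Spec_show_passwd show_passwd
  rw [pvAlt_eq_map, pvALoop_eq user_id user_id.toList.length 0 [] (by omega)]
  simp
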